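-- pv_equiv track=rewrite | github.com/frontdoorrr/hotly-app | app/services/onboarding_service.py | _estimate_remaining_time
-- ===== SOURCE A (Python) =====
-- from typing import Any, Dict, List, Optional
--
-- def _estimate_remaining_time(completed_steps: List[int]) -> int:
--     """남은 예상 시간 (초)."""
--     remaining_steps = [i for i in range(1, 6) if i not in completed_steps]
--
--     # 단계별 예상 소요 시간 (초)
--     step_times = {
--         1: 45,  # WELCOME
--         2: 75,  # CATEGORY_SETUP
--         3: 50,  # PREFERENCE_SETUP
--         4: 45,  # SAMPLE_GUIDE
--         5: 15,  # COMPLETION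
--     }
--
--     total_remaining = sum(step_times.get(step, 30) for step in remaining_steps)
--     return total_remaining
-- ===== SOURCE B (Python) =====
-- def _estimate_remaining_time(completed_steps):
--     """남은 예상 시간 (초): full total minus time of completed steps."""
--     step_times = {1: 45, 2: 75, 3: 50, 4: 45, 5: 15}
--     full_total = 230
--     return full_total - sum(t for s, t in step_times.items() if s in completed_steps)
-- ===== Notes on version B (the rewrite author's own statement) =====
-- stated objective: alternative
-- what changed: B subtracts the summed times of completed steps from the constant full total 230, instead of summing the times of the remaining steps as A does.
import Mathlib
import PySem

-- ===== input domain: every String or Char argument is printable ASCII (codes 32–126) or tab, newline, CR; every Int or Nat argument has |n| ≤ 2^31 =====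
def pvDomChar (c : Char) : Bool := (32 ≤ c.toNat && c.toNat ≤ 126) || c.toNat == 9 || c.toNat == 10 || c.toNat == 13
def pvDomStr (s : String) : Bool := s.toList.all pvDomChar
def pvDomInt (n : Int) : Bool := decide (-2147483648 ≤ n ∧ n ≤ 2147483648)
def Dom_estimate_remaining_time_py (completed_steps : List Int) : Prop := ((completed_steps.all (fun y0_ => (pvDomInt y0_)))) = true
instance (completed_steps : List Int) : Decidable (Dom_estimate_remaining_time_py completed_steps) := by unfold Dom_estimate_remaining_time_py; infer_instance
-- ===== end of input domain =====

-- B replaces A's "sum the remaining steps" by "constant full total 230 minus the summed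
-- times of completed steps" (objective: alternative decomposition; same cost).

-- ===== PORT A =====
def pvStepTimes : PySem.Dict Int Int :=
  PySem.Dict.ofList [(1, 45), (2, 75), (3, 50), (4, 45), (5, 15)]

def estimate_remaining_time_py (completed_steps : List Int) : Int :=
  let remaining_steps := (PySem.List.pyRange 1 6 1).filter (fun i => !(completed_steps.contains i))
  let total_remaining := remaining_steps.foldl (fun acc step => acc + PySem.Dict.getD pvStepTimes step 30) 0
  total_remaining

-- ===== PORT B =====
def estimate_remaining_time_py_alt (completed_steps : List Int) : Int :=
  let step_times : List (Int × Int) := [(1, 45), (2, 75), (3, 50), (4, 45), (5, 15)]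
  let full_total : Int := 230
  full_total - step_times.foldl (fun acc st => if completed_steps.contains st.1 then acc + st.2 else acc) 0

-- ===== PRECONDITION & SPEC =====
def Spec_estimate_remaining_time_py (completed_steps : List Int) (out : Int) : Prop := out = estimate_remaining_time_py_alt completed_steps
instance (completed_steps : List Int) (out : Int) : Decidable (Spec_estimate_remaining_time_py completed_steps out) := by unfold Spec_estimate_remaining_time_py; infer_instance

-- ===== CLAIM (what is proved, stated in full; the proofs are below) =====
def Claim_equal_estimate_remaining_time_py : Prop := ∀ (completed_steps : List Int), Dom_estimate_remaining_time_py completed_steps → Spec_estimate_remaining_time_py completed_steps (estimate_remaining_time_py completed_steps)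

-- ===== LEMMAS AND PROOFS =====
theorem estimate_remaining_time_key (cs : List Int) :
    estimate_remaining_time_py cs = estimate_remaining_time_py_alt cs := by
  unfold estimate_remaining_time_py estimate_remaining_time_py_alt
  have hr : PySem.List.pyRange 1 6 1 = [1, 2, 3, 4, 5] := by decide
  rw [hr]
  by_cases h1 : (1 : Int) ∈ cs <;> by_cases h2 : (2 : Int) ∈ cs <;>
    by_cases h3 : (3 : Int) ∈ cs <;> by_cases h4 : (4 : Int) ∈ cs <;>
    by_cases h5 : (5 : Int) ∈ cs <;>
  simp [h1, h2, h3, h4, h5, List.filter, List.foldl, pvStepTimes,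
    PySem.Dict.getD, PySem.Dict.get?, PySem.Dict.ofList, PySem.Dict.empty,
    PySem.Dict.update, PySem.Dict.insert, List.find?]

-- ===== VERDICT (by name: the statement is the Claim_ definition above) =====
theorem estimate_remaining_time_py_spec : Claim_equal_estimate_remaining_time_py := by
  intro cs _
  exact estimate_remaining_time_key cs
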